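-- pv_equiv track=rewrite | github.com/lnabergall/word-explorer | objects/objects.py | subwords_slow
-- ===== SOURCE A (Python) =====
-- from itertools import combinations, chain
--
-- def subwords_slow(word, length):
-- 	# Generate factors
-- 	factor_indices_list = []
-- 	start_end_indices = combinations(range(len(word)+1), 2)
-- 	for start_index, end_index in start_end_indices:
-- 		factor_indices_list.append(list(range(start_index, end_index)))
--
-- 	# Then generate sets of factors and filter
-- 	possible_subwords = combinations(factor_indices_list, length)
-- 	subword_indices_list = []
-- 	for subword_indices in possible_subwords:
-- 		indices = list(chain.from_iterable(subword_indices))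
-- 		if len(set(indices)) == len(indices):
-- 			subword_indices_list.append(subword_indices)
--
-- 	return subword_indices_list
-- ===== SOURCE B (Python) =====
-- def subwords_slow(word, length):
--     n = len(word)
--     factors = [list(range(s, e)) for s in range(n + 1) for e in range(s + 1, n + 1)]
--
--     def backtrack(remaining, rest, chosen, used):
--         if remaining == 0:
--             return [tuple(chosen)]
--         out = []
--         for j, f in enumerate(rest):
--             if all(x not in used for x in f):
--                 out.extend(backtrack(remaining - 1, rest[j + 1:], chosen + [f], used | set(f)))
--         return out
--
--     return backtrack(length, factors, [], set())
-- ===== Notes on version B (the rewrite author's own statement) =====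
-- stated objective: alternative
-- what changed: Instead of materialising every length-combination of the O(n^2) factors and filtering each by a full duplicate check, B does a backtracking enumeration over the factors in the same order, carrying the set of used positions and pruning a branch as soon as a factor overlaps it, so overlapping combinations are never extended.
import Mathlib
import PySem

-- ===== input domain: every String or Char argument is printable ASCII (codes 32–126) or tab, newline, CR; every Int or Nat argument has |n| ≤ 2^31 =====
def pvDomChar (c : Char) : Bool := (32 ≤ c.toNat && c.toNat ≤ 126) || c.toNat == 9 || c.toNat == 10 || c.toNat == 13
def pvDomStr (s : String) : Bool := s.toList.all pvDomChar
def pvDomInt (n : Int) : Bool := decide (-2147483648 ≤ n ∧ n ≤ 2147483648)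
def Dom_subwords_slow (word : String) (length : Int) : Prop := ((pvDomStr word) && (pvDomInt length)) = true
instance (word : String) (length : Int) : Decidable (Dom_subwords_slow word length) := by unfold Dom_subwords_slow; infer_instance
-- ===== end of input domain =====

-- B replaces "enumerate all length-combinations of factors, then filter the disjoint ones"
-- by a pruned backtracking enumeration in the same order (objective: alternative algorithm).


-- ===== PORT A =====
-- itertools.combinations(xs, r) in itertools order (lexicographic by positions)
def pvCombs {α : Type} : Nat → List α → List (List α)
  | 0, _ => [[]]
  | _ + 1, [] => []
  | k + 1, x :: xs => ((pvCombs k xs).map (fun t => x :: t)) ++ pvCombs (k + 1) xs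

def subwords_slow (word : String) (length : Int) : List (List (List Int)) :=
  let n : Int := PySem.Str.len word
  -- for (start_index, end_index) in combinations(range(len(word)+1), 2): append list(range(start, end))
  let factor_indices_list : List (List Int) :=
    (PySem.List.pyRange 0 (n + 1) 1).flatMap (fun s =>
      (PySem.List.pyRange (s + 1) (n + 1) 1).map (fun e => PySem.List.pyRange s e 1))
  -- for subword_indices in combinations(factor_indices_list, length): keep iff chained indices have no duplicate
  (pvCombs length.toNat factor_indices_list).filter (fun sub =>
    let indices := sub.flatten
    PySem.List.len (PySem.Set.ofList indices) == PySem.List.len indices)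

-- ===== PORT B =====
-- backtrack(remaining, rest, chosen, used): the for-loop over rest becomes structural
-- recursion "take the head factor (if disjoint from used) ++ continue with the tail"
def pvBacktrack (remaining : Int) (rest : List (List Int)) (chosen : List (List Int))
    (used : PySem.Set Int) : List (List (List Int)) :=
  if remaining == 0 then [chosen]
  else
    match rest with
    | [] => []
    | f :: rs =>
      (if f.all (fun x => !(PySem.Set.contains used x)) then
        pvBacktrack (remaining - 1) rs (chosen ++ [f]) (PySem.Set.union used f)
      else []) ++ pvBacktrack remaining rs chosen used

def subwords_slow_alt (word : String) (length : Int) : List (List (List Int)) :=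
  let n : Int := PySem.Str.len word
  let factors : List (List Int) :=
    (PySem.List.pyRange 0 (n + 1) 1).flatMap (fun s =>
      (PySem.List.pyRange (s + 1) (n + 1) 1).map (fun e => PySem.List.pyRange s e 1))
  pvBacktrack length factors [] PySem.Set.empty

-- ===== PRECONDITION & SPEC =====
-- Pre_ excludes length < 0, where Python's combinations(..., length) raises ValueError.
def Pre_subwords_slow (word : String) (length : Int) : Prop := 0 ≤ length
instance (word : String) (length : Int) : Decidable (Pre_subwords_slow word length) := by
  unfold Pre_subwords_slow; infer_instance
def pvWitness_subwords_slow : String × Int := ("ab", 2)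

def Spec_subwords_slow (word : String) (length : Int) (out : List (List (List Int))) : Prop := out = subwords_slow_alt word length
instance (word : String) (length : Int) (out : List (List (List Int))) : Decidable (Spec_subwords_slow word length out) := by unfold Spec_subwords_slow; infer_instance

-- ===== CLAIM (what is proved, stated in full; the proofs are below) =====
def Claim_equal_subwords_slow : Prop := ∀ (word : String) (length : Int), Dom_subwords_slow word length → Pre_subwords_slow word length → Spec_subwords_slow word length (subwords_slow word length)

-- ===== LEMMAS AND PROOFS =====

-- A's duplicate test len(set(l)) == len(l) computes exactly List.Nodup
theorem pvLenOfList (l : List Int) : (PySem.Set.ofList l).length = l.length ↔ l.Nodup := by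
  constructor
  · intro h
    induction l with
    | nil => simp
    | cons x xs ih =>
      rw [PySem.Set.ofList_cons] at h
      simp only [List.length_cons, Nat.add_right_cancel_iff] at h
      by_cases hx : x ∈ xs
      · exfalso
        have hlt : (PySem.Set.discard (PySem.Set.ofList xs) x).length < (PySem.Set.ofList xs).length := by
          simp only [PySem.Set.discard]
          rw [List.length_filter_lt_length_iff_exists]
          exact ⟨x, by simp [PySem.Set.mem_ofList, hx]⟩
        have := PySem.Set.length_ofList_le xs
        omega
      · have hdisc : PySem.Set.discard (PySem.Set.ofList xs) x = PySem.Set.ofList xs := by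
          simp only [PySem.Set.discard]
          apply List.filter_eq_self.mpr
          intro a ha
          simp [PySem.Set.mem_ofList] at ha
          simp
          rintro rfl; exact hx ha
        rw [hdisc] at h
        simp [List.nodup_cons, hx, ih h]
  · intro h
    rw [PySem.Set.ofList_eq_self_of_nodup l h]

theorem pvCheck_eq_nodup (l : List Int) :
    (PySem.List.len (PySem.Set.ofList l) == PySem.List.len l) = decide l.Nodup := by
  by_cases hn : l.Nodup
  · simp [PySem.List.len_eq, (pvLenOfList l).mpr hn, hn]
  · have h2 : (PySem.Set.ofList l).length ≠ l.length := fun h => hn ((pvLenOfList l).mp h)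
    simp [PySem.List.len_eq, hn]
    exact_mod_cast h2

-- main invariant: backtracking from (chosen, used) enumerates exactly the filtered combinations
theorem pvBacktrack_eq (rest : List (List Int)) : ∀ (r : Nat) (chosen : List (List Int))
    (used : PySem.Set Int),
    (∀ f ∈ rest, f.Nodup) → chosen.flatten.Nodup →
    (∀ x : Int, x ∈ used ↔ x ∈ chosen.flatten) →
    pvBacktrack (r : Int) rest chosen used =
      ((pvCombs r rest).filter (fun t => decide ((chosen.flatten ++ t.flatten).Nodup))).map
        (fun t => chosen ++ t) := by
  induction rest with
  | nil =>
    intro r chosen used _ hc _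
    match r with
    | 0 => simp [pvBacktrack, pvCombs, hc]
    | k + 1 => simp [pvBacktrack, pvCombs]; omega
  | cons f rs ih =>
    intro r chosen used hf hc hu
    match r with
    | 0 => simp [pvBacktrack, pvCombs, hc]
    | k + 1 =>
      rw [pvBacktrack, if_neg (by simp; omega)]
      have hcast : ((k + 1 : Nat) : Int) - 1 = (k : Nat) := by push_cast; ring
      rw [hcast]
      have hfnodup : f.Nodup := hf f (by simp)
      have hfr : ∀ g ∈ rs, g.Nodup := fun g hg => hf g (by simp [hg])
      rw [show pvCombs (k+1) (f :: rs) = ((pvCombs k rs).map (fun t => f :: t)) ++ pvCombs (k+1) rs from rfl]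
      rw [List.filter_append, List.map_append]
      rw [← ih (k+1) chosen used hfr hc hu]
      congr 1
      by_cases hok : f.all (fun x => !(PySem.Set.contains used x)) = true
      · rw [if_pos hok]
        have hdisj : ∀ x ∈ f, x ∉ chosen.flatten := by
          intro x hx
          have := (List.all_eq_true.mp hok) x hx
          simp at this
          exact fun hmem => this ((hu x).mpr hmem)
        have hc' : (chosen ++ [f]).flatten.Nodup := by
          simp only [List.flatten_append, List.flatten_cons, List.flatten_nil, List.append_nil]
          refine List.Nodup.append hc hfnodup ?_
          intro x hx hx'
          exact hdisj x hx' hx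
        have hu' : ∀ x : Int, x ∈ PySem.Set.union used f ↔ x ∈ (chosen ++ [f]).flatten := by
          intro x
          rw [PySem.Set.mem_union]
          simp [hu x]
        rw [ih k (chosen ++ [f]) (PySem.Set.union used f) hfr hc' hu']
        rw [List.filter_map, List.map_map]
        rw [show ((fun t => chosen ++ t) ∘ fun t => f :: t) = (fun t : List (List Int) => (chosen ++ [f]) ++ t) from funext fun t => by simp]
        congr 1
        apply List.filter_congr
        intro t _
        simp [Function.comp, List.append_assoc]
      · rw [if_neg hok]
        symm
        rw [List.map_eq_nil_iff, List.filter_eq_nil_iff]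
        intro t ht
        simp only [List.mem_map] at ht
        obtain ⟨t', _, rfl⟩ := ht
        simp only [List.flatten_cons, decide_eq_true_eq]
        intro hnd
        simp only [List.all_eq_true, Bool.not_eq_true'] at hok
        push Not at hok
        obtain ⟨x, hxf, hxused⟩ := hok
        have hxmem : x ∈ used := by
          rw [← PySem.Set.contains_iff]
          exact Bool.ne_false_iff.mp hxused
        have hxc : x ∈ chosen.flatten := (hu x).mp hxmem
        rw [List.nodup_append] at hnd
        exact hnd.2.2 x hxc x (List.mem_append.mpr (Or.inl hxf)) rfl


-- ===== VERDICT (by name: the statement is the Claim_ definition above) =====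
theorem subwords_slow_spec : Claim_equal_subwords_slow := by
  intro word length _ hpre
  unfold Spec_subwords_slow subwords_slow subwords_slow_alt
  set n : Int := PySem.Str.len word with hn
  set factors : List (List Int) :=
    (PySem.List.pyRange 0 (n + 1) 1).flatMap (fun s =>
      (PySem.List.pyRange (s + 1) (n + 1) 1).map (fun e => PySem.List.pyRange s e 1)) with hfacs
  have hfact : ∀ f ∈ factors, f.Nodup := by
    intro f hfmem
    rw [hfacs] at hfmem
    simp only [List.mem_flatMap, List.mem_map] at hfmem
    obtain ⟨s, -, e, -, rfl⟩ := hfmem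
    exact PySem.List.nodup_pyRange_one s e
  have hl : ((length.toNat : Nat) : Int) = length := Int.toNat_of_nonneg hpre
  rw [← hl]
  rw [pvBacktrack_eq factors length.toNat [] PySem.Set.empty hfact (by simp)
    (by intro x; simp [PySem.Set.empty])]
  simp only [List.flatten_nil, List.nil_append, pvCheck_eq_nodup]
  exact (List.map_id _).symm ▸ rfl
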